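-- pv_equiv track=rewrite | github.com/lorencjan/University-projects | Bachelor/2.semester/Scripting Languages/isj_proj3.py | to_pilot_alpha
-- ===== SOURCE A (Python) =====
-- def to_pilot_alpha(word):
--     """Returns a list of pilot alpha codes corresponding to the input word
--
--     >>> to_pilot_alpha('Smrz')
--     ['Sierra', 'Mike', 'Romeo', 'Zulu']
--     """
--
--     pilot_alpha = ['Alfa', 'Bravo', 'Charlie', 'Delta', 'Echo', 'Foxtrot',
--         'Golf', 'Hotel', 'India', 'Juliett', 'Kilo', 'Lima', 'Mike',
--         'November', 'Oscar', 'Papa', 'Quebec', 'Romeo', 'Sierra', 'Tango',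
--         'Uniform', 'Victor', 'Whiskey', 'Xray', 'Yankee', 'Zulu']
--
--     pilot_alpha_list = []
--
--     for char in word:
--         for word in pilot_alpha:
--             if(word[0]==char.upper()):
--                 pilot_alpha_list.append(word)
--
--     return pilot_alpha_list
-- ===== SOURCE B (Python) =====
-- PILOT = ('Alfa', 'Bravo', 'Charlie', 'Delta', 'Echo', 'Foxtrot',
--          'Golf', 'Hotel', 'India', 'Juliett', 'Kilo', 'Lima', 'Mike',
--          'November', 'Oscar', 'Papa', 'Quebec', 'Romeo', 'Sierra', 'Tango',
--          'Uniform', 'Victor', 'Whiskey', 'Xray', 'Yankee', 'Zulu')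
--
--
-- def to_pilot_alpha(word):
--     """Returns a list of pilot alpha codes corresponding to the input word.
--
--     Uses ASCII-code arithmetic: a letter's code, offset by 65 (uppercase) or 97
--     (lowercase), is its index into the alphabetically ordered PILOT tuple;
--     no string comparison, upper-casing or key lookup is needed.
--     """
--     out = []
--     for c in word:
--         o = ord(c)
--         if 65 <= o <= 90:
--             out.append(PILOT[o - 65])
--         elif 97 <= o <= 122:
--             out.append(PILOT[o - 97])
--     return out
-- ===== Notes on version B (the rewrite author's own statement) =====
-- stated objective: simpler
-- what changed: Replaces A's nested scan matching each character against the first letters of all 26 NATO words with ASCII-code arithmetic: a letter's code, offset by 65 or 97, directly indexes the alphabetically ordered tuple, with an explicit range check replacing upper() and string comparison.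
import Mathlib
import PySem

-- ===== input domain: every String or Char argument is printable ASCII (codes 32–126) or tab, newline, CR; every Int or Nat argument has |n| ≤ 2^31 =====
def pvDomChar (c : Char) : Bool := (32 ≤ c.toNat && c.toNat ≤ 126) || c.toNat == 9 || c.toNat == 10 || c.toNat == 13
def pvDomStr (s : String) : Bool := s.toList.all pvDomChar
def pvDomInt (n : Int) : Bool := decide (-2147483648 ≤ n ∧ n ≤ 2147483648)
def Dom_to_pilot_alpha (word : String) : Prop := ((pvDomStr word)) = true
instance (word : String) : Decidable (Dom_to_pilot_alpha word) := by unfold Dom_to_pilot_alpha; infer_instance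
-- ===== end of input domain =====

-- B replaces A's nested scan over the 26 NATO words with ASCII-code arithmetic:
-- a letter's code minus ord('A')/ord('a') indexes the ordered tuple directly
-- (objective: simpler).

-- the NATO word list (A's pilot_alpha literal / B's PILOT tuple)
def pvPilot : List String :=
  ["Alfa", "Bravo", "Charlie", "Delta", "Echo", "Foxtrot",
   "Golf", "Hotel", "India", "Juliett", "Kilo", "Lima", "Mike",
   "November", "Oscar", "Papa", "Quebec", "Romeo", "Sierra", "Tango",
   "Uniform", "Victor", "Whiskey", "Xray", "Yankee", "Zulu"]

-- ===== PORT A =====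
-- for char in word: for word in pilot_alpha: if word[0] == char.upper(): append
-- (the inner loop rebinds Python's 'word', but the outer iterator is already fixed,
--  so the iteration over the original word's characters is unaffected)
def to_pilot_alpha (word : String) : List String :=
  word.toList.foldl
    (fun acc c =>
      pvPilot.foldl
        (fun acc2 w =>
          if w.toList.take 1 == PySem.Chars.upper [c] then acc2 ++ [w] else acc2)
        acc)
    []

-- ===== PORT B =====
-- out = []; for c in word: o = ord(c); range-check and index PILOT[o-65]/PILOT[o-97]
-- (the indices are range-checked, so Python's PILOT[i] cannot raise; getD is exact here)
def to_pilot_alpha_alt (word : String) : List String :=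
  word.toList.foldl
    (fun out c =>
      let o := c.toNat
      if 65 ≤ o ∧ o ≤ 90 then out ++ [pvPilot.getD (o - 65) ""]
      else if 97 ≤ o ∧ o ≤ 122 then out ++ [pvPilot.getD (o - 97) ""]
      else out)
    []

-- ===== PRECONDITION & SPEC =====
def Spec_to_pilot_alpha (word : String) (out : List String) : Prop := out = to_pilot_alpha_alt word
instance (word : String) (out : List String) : Decidable (Spec_to_pilot_alpha word out) := by unfold Spec_to_pilot_alpha; infer_instance

-- ===== CLAIM (what is proved, stated in full; the proofs are below) =====
def Claim_equal_to_pilot_alpha : Prop := ∀ (word : String), Dom_to_pilot_alpha word → Spec_to_pilot_alpha word (to_pilot_alpha word)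

-- ===== LEMMAS AND PROOFS =====

-- what one character contributes to the output, in B's arithmetic form
def pvEmit (c : Char) : List String :=
  let o := c.toNat
  if 65 ≤ o ∧ o ≤ 90 then [pvPilot.getD (o - 65) ""]
  else if 97 ≤ o ∧ o ≤ 122 then [pvPilot.getD (o - 97) ""]
  else []

-- A's 26-word scan for one character yields exactly pvEmit, checked by
-- enumeration over every character code in the domain (< 127)
set_option maxRecDepth 4096 in
lemma pv_key_fin : ∀ n : Fin 127,
    pvPilot.filter (fun w => w.toList.take 1 == PySem.Chars.upper [Char.ofNat n.val])
      = pvEmit (Char.ofNat n.val) := by decide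

lemma pv_key (c : Char) (h : c.toNat < 127) :
    pvPilot.filter (fun w => w.toList.take 1 == PySem.Chars.upper [c]) = pvEmit c := by
  have h2 := pv_key_fin ⟨c.toNat, h⟩
  simpa [Char.ofNat_toNat] using h2

lemma pv_a_main (cs : List Char) (h : ∀ c ∈ cs, pvDomChar c = true) (acc : List String) :
    cs.foldl
      (fun acc c =>
        pvPilot.foldl
          (fun acc2 w =>
            if w.toList.take 1 == PySem.Chars.upper [c] then acc2 ++ [w] else acc2)
          acc)
      acc
    = acc ++ cs.flatMap pvEmit := by
  induction cs generalizing acc with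
  | nil => simp
  | cons c cs ih =>
    have hc : pvDomChar c = true := h c (List.mem_cons_self ..)
    have hlt : c.toNat < 127 := by simp [pvDomChar] at hc; omega
    have hrest : ∀ x ∈ cs, pvDomChar x = true := fun x hx => h x (List.mem_cons_of_mem _ hx)
    have hin :
        pvPilot.foldl
          (fun acc2 w =>
            if w.toList.take 1 == PySem.Chars.upper [c] then acc2 ++ [w] else acc2)
          acc
        = acc ++ pvEmit c := by
      have hfi := PySem.List.foldl_append_if
        (fun w => w.toList.take 1 == PySem.Chars.upper [c]) id pvPilot acc
      simpa [pv_key c hlt] using hfi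
    rw [List.foldl_cons, hin, ih hrest]
    simp

lemma pv_b_main (cs : List Char) (acc : List String) :
    cs.foldl
      (fun out c =>
        let o := c.toNat
        if 65 ≤ o ∧ o ≤ 90 then out ++ [pvPilot.getD (o - 65) ""]
        else if 97 ≤ o ∧ o ≤ 122 then out ++ [pvPilot.getD (o - 97) ""]
        else out)
      acc
    = acc ++ cs.flatMap pvEmit := by
  induction cs generalizing acc with
  | nil => simp
  | cons c cs ih =>
    rw [List.foldl_cons, ih]
    simp only [pvEmit, List.flatMap_cons]
    split_ifs <;> simp

-- ===== VERDICT (by name: the statement is the Claim_ definition above) =====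
theorem to_pilot_alpha_spec : Claim_equal_to_pilot_alpha := by
  intro word hdom
  have h : ∀ c ∈ word.toList, pvDomChar c = true := by
    simpa [Dom_to_pilot_alpha, pvDomStr, List.all_eq_true] using hdom
  show to_pilot_alpha word = to_pilot_alpha_alt word
  rw [to_pilot_alpha, to_pilot_alpha_alt, pv_a_main word.toList h [], pv_b_main]
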